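-- pv_equiv track=rewrite | github.com/vaidehidubey122005/Misson_DSA | hackerrank/queen-attack-II.py | queenAttack
-- ===== SOURCE A (Python) =====
-- def queenAttack(board):
--     # Get the queen's position
--     n = len(board)
--     q_x = q_y = -1
--
--     for i in range(n):
--         for j in range(n):
--             if board[i][j] == 'Q':
--                 q_x, q_y = i, j
--                 break
--
--     # Directions: [up, down, left, right, up-left, up-right, down-left, down-right]
--     directions = [
--         (-1, 0),  # Up
--         (1, 0),   # Down
--         (0, -1),  # Left
--         (0, 1),   # Right
--         (-1, -1), # Up-left
--         (-1, 1),  # Up-right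
--         (1, -1),  # Down-left
--         (1, 1)    # Down-right
--     ]
--
--     count = 0
--
--     # Iterate through each direction and check for attackable squares
--     for direction in directions:
--         dx, dy = direction
--         x, y = q_x, q_y
--
--         while 0 <= x + dx < n and 0 <= y + dy < n:
--             x += dx
--             y += dy
--             if board[x][y] == 'X':  # There's an obstacle
--                 break
--             count += 1
--
--     return count
-- ===== SOURCE B (Python) =====
-- def queenAttack(board):
--     n = len(board)
--     qx = qy = -1
--     obstacles = []
--     for i in range(n):
--         for j in range(n):
--             c = board[i][j]
--             if c == 'Q':
--                 qx, qy = i, j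
--             elif c == 'X':
--                 obstacles.append((i, j))
--     total = 0
--     for dx, dy in ((-1, 0), (1, 0), (0, -1), (0, 1), (-1, -1), (-1, 1), (1, -1), (1, 1)):
--         reach = sum(1 for k in range(1, n + 1)
--                     if 0 <= qx + k * dx < n and 0 <= qy + k * dy < n)
--         for i, j in obstacles:
--             k = (i - qx) * dx if dx else (j - qy) * dy
--             if k >= 1 and (i - qx, j - qy) == (k * dx, k * dy):
--                 reach = min(reach, k - 1)
--         total += reach
--     return total
-- ===== Notes on version B (the rewrite author's own statement) =====
-- stated objective: alternative
-- what changed: B replaces A's cell-by-cell step-and-check walk along each of the 8 rays by one grid scan that records the queen and the obstacle list, then per direction computes reach = min(count of in-bounds steps, nearest on-ray obstacle distance - 1); Pre_ excludes ragged boards (rows shorter than the row count, where A raises IndexError except on lucky layouts and B raises too) and boards with more than one queen on the n×n grid (which queen A settles on is an accident of its inner-only break).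
-- outside the precondition, e.g. on queenAttack(['Q', '.X.', 'XQ.']): A returns 3, B raises IndexError; on queenAttack(['.Q..', 'XQ.X', '..Q.', 'QX.Q']): A returns 4, B returns 5
import Mathlib
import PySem

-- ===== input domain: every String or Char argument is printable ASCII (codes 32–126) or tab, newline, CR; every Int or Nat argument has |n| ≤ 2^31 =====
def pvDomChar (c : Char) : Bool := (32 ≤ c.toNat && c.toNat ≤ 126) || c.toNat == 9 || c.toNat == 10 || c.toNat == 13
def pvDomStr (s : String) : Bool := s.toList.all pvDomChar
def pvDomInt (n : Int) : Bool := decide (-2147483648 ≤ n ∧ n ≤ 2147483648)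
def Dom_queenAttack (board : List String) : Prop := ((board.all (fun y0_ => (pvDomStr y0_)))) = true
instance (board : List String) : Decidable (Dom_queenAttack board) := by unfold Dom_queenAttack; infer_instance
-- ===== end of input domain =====

-- B replaces A's cell-by-cell step-and-check ray walks by one grid scan (queen + obstacle list) followed by
-- per-direction arithmetic: reach = min(in-bounds step count, nearest on-ray obstacle distance - 1)
-- (objective: alternative, same asymptotic cost).

-- board[i][j] as a total function; under Pre_ every access the two programs make is in range, so the default is never read
def cellAt (board : List String) (i j : Int) : Char :=
  (((PySem.List.pyGet? board i).map String.toList).bind fun r => PySem.List.pyGet? r j).getD '.'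

-- ===== PORT A =====
-- the double scan "for i in range(n): for j in range(n): if board[i][j]=='Q': q_x,q_y=i,j; break" (break = first match in the row)
def qaScan (board : List String) (n : Int) : Int × Int :=
  (List.range n.toNat).foldl
    (fun (q : Int × Int) (i : Nat) =>
      match (List.range n.toNat).find? (fun (j : Nat) => cellAt board (i : Int) (j : Int) == 'Q') with
      | some j => ((i : Int), (j : Int))
      | none => q)
    (-1, -1)

-- the while loop; fuel n suffices: each iteration moves one cell further along the ray, which leaves the n×n grid after at most n steps
def qaWalk (board : List String) (n dx dy : Int) : Int → Int → Nat → Int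
  | _, _, 0 => 0
  | x, y, fuel + 1 =>
    if 0 ≤ x + dx ∧ x + dx < n ∧ 0 ≤ y + dy ∧ y + dy < n then
      if cellAt board (x + dx) (y + dy) == 'X' then 0
      else 1 + qaWalk board n dx dy (x + dx) (y + dy) fuel
    else 0

def qaDirs : List (Int × Int) := [(-1,0),(1,0),(0,-1),(0,1),(-1,-1),(-1,1),(1,-1),(1,1)]

def queenAttack (board : List String) : Int :=
  let n := PySem.List.len board
  let q := qaScan board n
  qaDirs.foldl (fun count d => count + qaWalk board n d.1 d.2 q.1 q.2 n.toNat) 0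

-- ===== PORT B =====
-- the grid scan "for i in range(n): for j in range(n): c = board[i][j]; if c == 'Q': qx, qy = i, j; elif c == 'X': obstacles.append((i, j))"
def qbScan (board : List String) (n : Int) : (Int × Int) × List (Int × Int) :=
  (List.range n.toNat).foldl
    (fun st (i : Nat) =>
      (List.range n.toNat).foldl
        (fun (st : (Int × Int) × List (Int × Int)) (j : Nat) =>
          let c := cellAt board (i : Int) (j : Int)
          if c == 'Q' then (((i : Int), (j : Int)), st.2)
          else if c == 'X' then (st.1, st.2 ++ [((i : Int), (j : Int))])
          else st)
        st)
    ((-1, -1), [])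

-- "reach = sum(1 for k in range(1, n + 1) if 0 <= qx + k*dx < n and 0 <= qy + k*dy < n)"
def qbReach (n qx qy dx dy : Int) : Int :=
  (PySem.List.pyRange 1 (n + 1) 1).foldl
    (fun acc k =>
      if 0 ≤ qx + k * dx ∧ qx + k * dx < n ∧ 0 ≤ qy + k * dy ∧ qy + k * dy < n then acc + 1
      else acc)
    0

-- the inner loop "for i, j in obstacles: … reach = min(reach, k - 1)"
def qbBest (obs : List (Int × Int)) (qx qy dx dy reach0 : Int) : Int :=
  obs.foldl
    (fun reach o =>
      let k := if dx ≠ 0 then (o.1 - qx) * dx else (o.2 - qy) * dy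
      if 1 ≤ k ∧ o.1 - qx = k * dx ∧ o.2 - qy = k * dy then min reach (k - 1) else reach)
    reach0

def queenAttack_alt (board : List String) : Int :=
  let n := PySem.List.len board
  let scan := qbScan board n
  let q := scan.1
  let obs := scan.2
  ([(-1,0),(1,0),(0,-1),(0,1),(-1,-1),(-1,1),(1,-1),(1,1)] : List (Int × Int)).foldl
    (fun total d => total + qbBest obs q.1 q.2 d.1 d.2 (qbReach n q.1 q.2 d.1 d.2)) 0

-- ===== PRECONDITION & SPEC =====
-- the n×n index grid both programs read
def gridCells (m : Nat) : List (Nat × Nat) :=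
  (List.range m).flatMap (fun i => (List.range m).map (fun j => (i, j)))

-- Pre_ restricts to well-formed inputs: no row shorter than the row count, and at most one queen on the n×n grid.
-- Excluded: ragged boards (A's board[i][j] raises IndexError except on lucky layouts, and B raises there too) and
-- boards with several grid queens (which queen A settles on — last row with a queen, first queen in it — is an
-- accident of its inner-only break).
def Pre_queenAttack (board : List String) : Prop :=
  (∀ s ∈ board, board.length ≤ s.toList.length) ∧
  ((gridCells board.length).filter
    (fun p => cellAt board (p.1 : Int) (p.2 : Int) == 'Q')).length ≤ 1
instance (board : List String) : Decidable (Pre_queenAttack board) := by unfold Pre_queenAttack; infer_instance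

def pvWitness_queenAttack : List String := ["Q"]

def Spec_queenAttack (board : List String) (out : Int) : Prop := out = queenAttack_alt board
instance (board : List String) (out : Int) : Decidable (Spec_queenAttack board out) := by unfold Spec_queenAttack; infer_instance

-- ===== CLAIM (what is proved, stated in full; the proofs are below) =====
def Claim_equal_queenAttack : Prop := ∀ (board : List String), Dom_queenAttack board → Pre_queenAttack board → Spec_queenAttack board (queenAttack board)

-- ===== LEMMAS AND PROOFS =====

-- A's reference walk: m in-bounds steps remain; stop early at the first 'X'
def pvSpecW (board : List String) (dx dy : Int) : Nat → Int → Int → Int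
  | 0, _, _ => 0
  | m + 1, x, y =>
    if cellAt board (x + dx) (y + dy) == 'X' then 0
    else 1 + pvSpecW board dx dy m (x + dx) (y + dy)

lemma qaWalk_eq_specW (board : List String) (n dx dy : Int) :
    ∀ (fuel : Nat) (x y e : Int), 0 ≤ e → e ≤ (fuel : Int) →
    (∀ k : Int, 1 ≤ k →
      ((0 ≤ x + k * dx ∧ x + k * dx < n ∧ 0 ≤ y + k * dy ∧ y + k * dy < n) ↔ k ≤ e)) →
    qaWalk board n dx dy x y fuel = pvSpecW board dx dy e.toNat x y := by
  intro fuel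
  induction fuel with
  | zero =>
    intro x y e h0 hf _
    have : e = 0 := by omega
    subst this
    simp [qaWalk, pvSpecW]
  | succ fuel ih =>
    intro x y e h0 hf hE
    have h1 := hE 1 (by norm_num)
    simp only [one_mul] at h1
    by_cases he : e ≤ 0
    · have : e = 0 := by omega
      subst this
      have hcond : ¬(0 ≤ x + dx ∧ x + dx < n ∧ 0 ≤ y + dy ∧ y + dy < n) := by
        rw [h1]; omega
      simp [qaWalk, hcond, pvSpecW]
    · have hcond : 0 ≤ x + dx ∧ x + dx < n ∧ 0 ≤ y + dy ∧ y + dy < n := by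
        rw [h1]; omega
      have hto : e.toNat = (e - 1).toNat + 1 := by omega
      rw [hto]
      by_cases hX : cellAt board (x + dx) (y + dy) == 'X'
      · simp [qaWalk, hcond, hX, pvSpecW]
      · have hE' : ∀ k : Int, 1 ≤ k →
            ((0 ≤ (x + dx) + k * dx ∧ (x + dx) + k * dx < n ∧
              0 ≤ (y + dy) + k * dy ∧ (y + dy) + k * dy < n) ↔ k ≤ e - 1) := by
          intro k hk
          have h3 := hE (k + 1) (by omega)
          have hax : x + dx + k * dx = x + (k + 1) * dx := by ring
          have hay : y + dy + k * dy = y + (k + 1) * dy := by ring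
          rw [hax, hay, h3]; omega
        have := ih (x + dx) (y + dy) (e - 1) (by omega) (by omega) hE'
        simp [qaWalk, hcond, hX, pvSpecW, this]

lemma specW_of_no_hit (board : List String) (dx dy : Int) :
    ∀ (m : Nat) (x y : Int),
    (∀ k : Nat, 1 ≤ k → k ≤ m → ¬(cellAt board (x + k * dx) (y + k * dy) == 'X')) →
    pvSpecW board dx dy m x y = (m : Int) := by
  intro m
  induction m with
  | zero => intro x y _; simp [pvSpecW]
  | succ m ih =>
    intro x y h
    have h1 := h 1 (by norm_num) (by omega)
    simp only [Nat.cast_one, one_mul] at h1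
    have hrec := ih (x + dx) (y + dy) (by
      intro k hk hkm
      have := h (k + 1) (by omega) (by omega)
      push_cast at this ⊢
      have hax : x + dx + k * dx = x + (k + 1) * dx := by ring
      have hay : y + dy + k * dy = y + (k + 1) * dy := by ring
      rw [hax, hay]; exact this)
    simp [pvSpecW, h1, hrec]
    try omega

lemma specW_of_first_hit (board : List String) (dx dy : Int) :
    ∀ (m : Nat) (x y : Int) (k0 : Nat), 1 ≤ k0 → k0 ≤ m →
    (cellAt board (x + k0 * dx) (y + k0 * dy) == 'X') →
    (∀ k : Nat, 1 ≤ k → k < k0 → ¬(cellAt board (x + k * dx) (y + k * dy) == 'X')) →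
    pvSpecW board dx dy m x y = (k0 : Int) - 1 := by
  intro m
  induction m with
  | zero => intro x y k0 h1 h2 _ _; omega
  | succ m ih =>
    intro x y k0 hk1 hkm hX hmin
    match k0, hk1 with
    | 1, _ =>
      push_cast at hX
      simp only [one_mul] at hX
      simp [pvSpecW, hX]
    | (k0' + 2), _ =>
      have hnot1 := hmin 1 (by norm_num) (by omega)
      push_cast at hnot1
      simp only [one_mul] at hnot1
      have hrec := ih (x + dx) (y + dy) (k0' + 1) (by omega) (by omega)
        (by
          push_cast at hX ⊢
          have hax : x + dx + (k0' + 1) * dx = x + (k0' + 1 + 1) * dx := by ring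
          have hay : y + dy + (k0' + 1) * dy = y + (k0' + 1 + 1) * dy := by ring
          rw [hax, hay]; convert hX using 3)
        (by
          intro k hk hkk
          have := hmin (k + 1) (by omega) (by omega)
          push_cast at this ⊢
          have hax : x + dx + k * dx = x + (k + 1) * dx := by ring
          have hay : y + dy + k * dy = y + (k + 1) * dy := by ring
          rw [hax, hay]; exact this)
      simp [pvSpecW, hnot1, hrec]
      try ring

-- the per-obstacle candidate distance of B's inner test, and B's on-ray condition
def pvKv (qx qy dx dy : Int) (o : Int × Int) : Int :=
  if dx ≠ 0 then (o.1 - qx) * dx else (o.2 - qy) * dy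
abbrev pvRay (qx qy dx dy : Int) (o : Int × Int) : Prop :=
  1 ≤ pvKv qx qy dx dy o ∧ o.1 - qx = pvKv qx qy dx dy o * dx ∧ o.2 - qy = pvKv qx qy dx dy o * dy

lemma qbBest_cons (obs : List (Int × Int)) (qx qy dx dy a : Int) (o : Int × Int) :
    qbBest (o :: obs) qx qy dx dy a =
      qbBest obs qx qy dx dy
        (if pvRay qx qy dx dy o then min a (pvKv qx qy dx dy o - 1) else a) := by
  show qbBest obs qx qy dx dy _ = _
  congr 1

lemma qbBest_le (obs : List (Int × Int)) (qx qy dx dy : Int) :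
    ∀ a, qbBest obs qx qy dx dy a ≤ a := by
  induction obs with
  | nil => intro a; simp [qbBest]
  | cons o obs ih =>
    intro a
    rw [qbBest_cons]
    split_ifs with h
    · exact le_trans (ih _) (by omega)
    · exact ih a

lemma qbBest_le_ray (obs : List (Int × Int)) (qx qy dx dy : Int) :
    ∀ (a : Int) (o : Int × Int), o ∈ obs → pvRay qx qy dx dy o →
    qbBest obs qx qy dx dy a ≤ pvKv qx qy dx dy o - 1 := by
  induction obs with
  | nil => intro a o h; simp at h
  | cons p obs ih =>
    intro a o hmem hray
    rcases List.mem_cons.mp hmem with h | h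
    · subst h
      rw [qbBest_cons, if_pos hray]
      exact le_trans (qbBest_le _ _ _ _ _ _) (by omega)
    · rw [qbBest_cons]; exact ih _ o h hray

lemma qbBest_cases (obs : List (Int × Int)) (qx qy dx dy : Int) :
    ∀ a, qbBest obs qx qy dx dy a = a ∨
      ∃ o ∈ obs, pvRay qx qy dx dy o ∧
        qbBest obs qx qy dx dy a = pvKv qx qy dx dy o - 1 := by
  induction obs with
  | nil => intro a; left; rfl
  | cons p obs ih =>
    intro a
    by_cases h : pvRay qx qy dx dy p
    · rcases ih (min a (pvKv qx qy dx dy p - 1)) with h2 | ⟨o, ho, hray, h2⟩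
      · rcases min_choice a (pvKv qx qy dx dy p - 1) with hm | hm
        · left; rw [qbBest_cons, if_pos h, h2, hm]
        · right
          exact ⟨p, List.mem_cons_self, h, by rw [qbBest_cons, if_pos h, h2, hm]⟩
      · right
        exact ⟨o, List.mem_cons_of_mem _ ho, hray, by rw [qbBest_cons, if_pos h]; exact h2⟩
    · rcases ih a with h2 | ⟨o, ho, hray, h2⟩
      · left; rw [qbBest_cons, if_neg h]; exact h2
      · right; exact ⟨o, List.mem_cons_of_mem _ ho, hray, by rw [qbBest_cons, if_neg h]; exact h2⟩

-- the edge distance of a ray, in closed form (proof-side value; B computes it by counting)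
def pvEdge (n qx qy dx dy : Int) : Int :=
  max 0 (min
    (if dx ≠ 0 then (if dx < 0 then qx else n - 1 - qx) else (if 0 ≤ qx ∧ qx < n then n else 0))
    (if dy ≠ 0 then (if dy < 0 then qy else n - 1 - qy) else (if 0 ≤ qy ∧ qy < n then n else 0)))

lemma pvEdge_spec (n qx qy dx dy : Int) (hn : 0 ≤ n)
    (hdx : dx = -1 ∨ dx = 0 ∨ dx = 1) (hdy : dy = -1 ∨ dy = 0 ∨ dy = 1)
    (hne : ¬(dx = 0 ∧ dy = 0))
    (hq : (0 ≤ qx ∧ qx < n ∧ 0 ≤ qy ∧ qy < n) ∨ (qx = -1 ∧ qy = -1)) :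
    0 ≤ pvEdge n qx qy dx dy ∧ pvEdge n qx qy dx dy ≤ n ∧
    (∀ k : Int, 1 ≤ k →
      ((0 ≤ qx + k * dx ∧ qx + k * dx < n ∧ 0 ≤ qy + k * dy ∧ qy + k * dy < n) ↔
        k ≤ pvEdge n qx qy dx dy)) := by
  rcases hq with ⟨h1, h2, h3, h4⟩ | ⟨h1, h2⟩ <;>
    (rcases hdx with h | h | h <;> rcases hdy with h' | h' | h' <;> subst h <;> subst h' <;>
      first
      | exact absurd ⟨rfl, rfl⟩ hne
      | exact ⟨by unfold pvEdge; split_ifs <;> omega, by unfold pvEdge; split_ifs <;> omega,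
          fun k hk => by unfold pvEdge; split_ifs <;> omega⟩)

lemma countP_range_lt (e : Int) : ∀ m : Nat,
    (List.range m).countP (fun (i : Nat) => decide ((i : Int) < e)) = min e.toNat m := by
  intro m
  induction m with
  | zero => simp
  | succ m ih =>
    rw [List.range_succ, List.countP_append, ih]
    by_cases h : (m : Int) < e <;> simp [h] <;> omega

-- B's step count equals the closed-form edge distance
lemma qbReach_eq_pvEdge (n qx qy dx dy : Int) (hn : 0 ≤ n)
    (hdx : dx = -1 ∨ dx = 0 ∨ dx = 1) (hdy : dy = -1 ∨ dy = 0 ∨ dy = 1)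
    (hne : ¬(dx = 0 ∧ dy = 0))
    (hq : (0 ≤ qx ∧ qx < n ∧ 0 ≤ qy ∧ qy < n) ∨ (qx = -1 ∧ qy = -1)) :
    qbReach n qx qy dx dy = pvEdge n qx qy dx dy := by
  obtain ⟨h0, hn', hE⟩ := pvEdge_spec n qx qy dx dy hn hdx hdy hne hq
  set e := pvEdge n qx qy dx dy with hedef
  unfold qbReach
  rw [PySem.List.foldl_ite_add_one]
  rw [PySem.List.pyRange_one, List.countP_map]
  have hc : (List.range (n + 1 - 1).toNat).countP
        ((fun k => decide (0 ≤ qx + k * dx ∧ qx + k * dx < n ∧ 0 ≤ qy + k * dy ∧ qy + k * dy < n)) ∘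
          (fun (k : Nat) => (1 : Int) + k)) =
      (List.range (n + 1 - 1).toNat).countP (fun (i : Nat) => decide ((i : Int) < e)) := by
    apply List.countP_congr
    intro i _
    simp only [Function.comp_apply, decide_eq_true_eq]
    rw [hE (1 + (i : Int)) (by omega)]
    omega
  rw [hc, countP_range_lt]
  omega

-- grid cells
lemma mem_gridCells (m : Nat) (p : Nat × Nat) :
    p ∈ gridCells m ↔ p.1 < m ∧ p.2 < m := by
  rcases p with ⟨i, j⟩
  simp [gridCells]

lemma filterMap_if_eq_map_filter {α β : Type} (L : List α) (q : α → Bool) (f : α → β) :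
    L.filterMap (fun a => if q a then some (f a) else none) = (L.filter q).map f := by
  induction L with
  | nil => rfl
  | cons a L ih =>
    by_cases h : q a <;> simp [List.filterMap_cons, List.filter_cons, h, ih]

-- the queen and obstacle predicates of the grid scan
def pvQ (board : List String) (p : Nat × Nat) : Bool := cellAt board (p.1 : Int) (p.2 : Int) == 'Q'
def pvX (board : List String) (p : Nat × Nat) : Bool := cellAt board (p.1 : Int) (p.2 : Int) == 'X'

lemma qbScan_eq_foldl (board : List String) (n : Int) :
    qbScan board n = (gridCells n.toNat).foldl
      (fun (st : (Int × Int) × List (Int × Int)) p =>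
        if pvQ board p then (((p.1 : Int), (p.2 : Int)), st.2)
        else if pvX board p then (st.1, st.2 ++ [((p.1 : Int), (p.2 : Int))])
        else st)
      ((-1, -1), []) := by
  unfold qbScan gridCells pvQ pvX
  rw [List.foldl_flatMap]
  simp only [List.foldl_map]

lemma scan_fst (board : List String) :
    ∀ (L : List (Nat × Nat)) (st : (Int × Int) × List (Int × Int)),
      (L.foldl
        (fun (st : (Int × Int) × List (Int × Int)) p =>
          if pvQ board p then (((p.1 : Int), (p.2 : Int)), st.2)
          else if pvX board p then (st.1, st.2 ++ [((p.1 : Int), (p.2 : Int))])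
          else st) st).1 =
      L.foldl (fun q p => if pvQ board p then ((p.1 : Int), (p.2 : Int)) else q) st.1 := by
  intro L
  induction L with
  | nil => intro st; rfl
  | cons p L ih =>
    intro st
    by_cases hq : pvQ board p
    · simp only [List.foldl_cons, if_pos hq]
      exact ih _
    · by_cases hx : pvX board p <;> simp only [List.foldl_cons, if_neg hq, if_pos, hx, if_true, if_false] <;> exact ih _

lemma scan_snd (board : List String) :
    ∀ (L : List (Nat × Nat)) (st : (Int × Int) × List (Int × Int)),
      (L.foldl
        (fun (st : (Int × Int) × List (Int × Int)) p =>
          if pvQ board p then (((p.1 : Int), (p.2 : Int)), st.2)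
          else if pvX board p then (st.1, st.2 ++ [((p.1 : Int), (p.2 : Int))])
          else st) st).2 =
      st.2 ++ (L.filter (pvX board)).map (fun p => ((p.1 : Int), (p.2 : Int))) := by
  intro L
  induction L with
  | nil => intro st; simp
  | cons p L ih =>
    intro st
    have hQX : pvQ board p → ¬ pvX board p := by
      unfold pvQ pvX
      intro h1 h2
      rw [beq_iff_eq] at h1 h2
      rw [h1] at h2
      exact absurd h2 (by decide)
    by_cases hq : pvQ board p
    · have hx : pvX board p = false := by
        have := hQX hq
        simpa using this
      simp only [List.foldl_cons, if_pos hq]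
      rw [ih]
      simp [List.filter_cons, hx]
    · by_cases hx : pvX board p
      · simp only [List.foldl_cons, if_neg hq, if_pos hx]
        rw [ih]
        simp [List.filter_cons, hx, List.append_assoc]
      · simp only [List.foldl_cons, if_neg hq, if_neg hx]
        rw [ih]
        simp [List.filter_cons, hx]

lemma foldl_opt_getLastD {α β : Type} (f : α → Option β) :
    ∀ (l : List α) (init : β),
      l.foldl (fun q i => (f i).getD q) init =
        (l.filterMap f).getLastD init := by
  intro l
  induction l with
  | nil => intro init; rfl
  | cons a l ih =>
    intro init
    rcases h : f a with _ | p <;> simp only [List.foldl_cons, List.filterMap_cons, h,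
      Option.getD_some, Option.getD_none] <;> rw [ih]
    rw [List.getLastD_cons]

def pvGA (board : List String) (i : Nat) : Option (Int × Int) :=
  ((List.range board.length).find? (fun (j : Nat) => cellAt board (i : Int) (j : Int) == 'Q')).map
    (fun j => ((i : Int), (j : Int)))

lemma qaScan_eq_getLastD (board : List String) :
    qaScan board (PySem.List.len board) =
      ((List.range board.length).filterMap (pvGA board)).getLastD (-1, -1) := by
  have hN : PySem.List.len board = (board.length : Int) := by simp [PySem.List.len_eq]
  unfold qaScan
  rw [hN, Int.toNat_natCast]
  rw [PySem.List.foldl_congr_mem (g := fun (q : Int × Int) i => (pvGA board i).getD q)]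
  · exact foldl_opt_getLastD (pvGA board) (List.range board.length) (-1, -1)
  · intro q i _
    unfold pvGA
    rcases h : (List.range board.length).find?
        (fun (j : Nat) => cellAt board (i : Int) (j : Int) == 'Q') with _ | j <;> simp [h]

lemma find?_range_eq_some (p : Nat → Bool) (m k : Nat) (hk : k < m) (hpk : p k = true)
    (hmin : ∀ j, j < k → p j = false) : (List.range m).find? p = some k := by
  induction m with
  | zero => omega
  | succ m ih =>
    rw [List.range_succ, List.find?_append]
    by_cases hkm : k < m
    · rw [ih hkm]
      rfl
    · have hkm' : k = m := by omega
      subst hkm'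
      have hnone : (List.range k).find? p = none :=
        List.find?_eq_none.mpr (fun j hj => by
          simp only [Bool.not_eq_true]
          exact hmin j (List.mem_range.mp hj))
      rw [hnone]
      simp [hpk]

lemma filterMap_single {β : Type} (f : Nat → Option β) (m r : Nat) (v : β) (hr : r < m)
    (hfr : f r = some v) (hother : ∀ i, i < m → i ≠ r → f i = none) :
    (List.range m).filterMap f = [v] := by
  induction m with
  | zero => omega
  | succ m ih =>
    rw [List.range_succ, List.filterMap_append]
    by_cases hrm : r < m
    · rw [ih hrm (fun i hi => hother i (by omega))]
      rw [List.filterMap_cons, hother m (by omega) (by omega)]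
      rfl
    · have : r = m := by omega
      subst this
      rw [show List.filterMap f (List.range r) = [] from
        List.filterMap_eq_nil_iff.mpr (fun i hi => hother i (by
          have := List.mem_range.mp hi; omega) (by
          have := List.mem_range.mp hi; omega))]
      simp [List.filterMap_cons, hfr]

-- under Pre_, both scans yield the same queen, and it is on the grid or at (-1,-1)
lemma queen_eq (board : List String)
    (h1 : ((gridCells board.length).filter (pvQ board)).length ≤ 1) :
    qaScan board (PySem.List.len board) = (qbScan board (PySem.List.len board)).1 ∧
      ((0 ≤ (qbScan board (PySem.List.len board)).1.1 ∧
          (qbScan board (PySem.List.len board)).1.1 < (board.length : Int) ∧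
          0 ≤ (qbScan board (PySem.List.len board)).1.2 ∧
          (qbScan board (PySem.List.len board)).1.2 < (board.length : Int)) ∨
        ((qbScan board (PySem.List.len board)).1.1 = -1 ∧
          (qbScan board (PySem.List.len board)).1.2 = -1)) := by
  have hN : PySem.List.len board = (board.length : Int) := by simp [PySem.List.len_eq]
  have hB0 : (qbScan board (PySem.List.len board)).1 =
      (((gridCells board.length).filter (pvQ board)).map
        (fun (p : Nat × Nat) => ((p.1 : Int), (p.2 : Int)))).getLastD (-1, -1) := by
    rw [qbScan_eq_foldl, hN, Int.toNat_natCast, scan_fst]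
    rw [PySem.List.foldl_congr_mem
      (g := fun (q : Int × Int) (p : Nat × Nat) =>
        ((fun (p : Nat × Nat) => if pvQ board p then some ((p.1 : Int), (p.2 : Int)) else none) p).getD q)]
    · rw [foldl_opt_getLastD, filterMap_if_eq_map_filter]
    · intro q p _
      by_cases h : pvQ board p <;> simp [h]
  rcases hQ : (gridCells board.length).filter (pvQ board) with _ | ⟨p0, rest⟩
  · -- no queen on the grid
    have hnoQ : ∀ p ∈ gridCells board.length, ¬ pvQ board p := List.filter_eq_nil_iff.mp hQ
    have hB : (qbScan board (PySem.List.len board)).1 = (-1, -1) := by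
      rw [hB0, hQ]
      rfl
    have hA : qaScan board (PySem.List.len board) = (-1, -1) := by
      rw [qaScan_eq_getLastD]
      rw [List.filterMap_eq_nil_iff.mpr (fun i hi => by
        unfold pvGA
        rw [List.find?_eq_none.mpr (fun j hj => by
          simpa [pvQ] using hnoQ (i, j)
            ((mem_gridCells board.length (i, j)).mpr
              ⟨List.mem_range.mp hi, List.mem_range.mp hj⟩))]
        rfl)]
      rfl
    rw [hA, hB]
    exact ⟨rfl, Or.inr ⟨rfl, rfl⟩⟩
  · -- exactly one grid queen p0 (h1 forces rest = [])
    have hrest : rest = [] := by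
      have := congrArg List.length hQ
      simp at this
      cases rest with
      | nil => rfl
      | cons a t => rw [hQ] at h1; simp at h1
    subst hrest
    have hp0Q : pvQ board p0 ∧ p0 ∈ gridCells board.length := by
      have := List.mem_filter.mp (by rw [hQ]; exact List.mem_singleton.mpr rfl)
      exact ⟨this.2, this.1⟩
    obtain ⟨hp0, hp0mem⟩ := hp0Q
    obtain ⟨hr, hc⟩ := (mem_gridCells board.length p0).mp hp0mem
    have huniq : ∀ p ∈ gridCells board.length, pvQ board p → p = p0 := by
      intro p hp hq
      have : p ∈ (gridCells board.length).filter (pvQ board) :=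
        List.mem_filter.mpr ⟨hp, hq⟩
      rw [hQ] at this
      exact List.mem_singleton.mp this
    have hB : (qbScan board (PySem.List.len board)).1 = ((p0.1 : Int), (p0.2 : Int)) := by
      rw [hB0, hQ]
      rfl
    have hA : qaScan board (PySem.List.len board) = ((p0.1 : Int), (p0.2 : Int)) := by
      rw [qaScan_eq_getLastD]
      rw [filterMap_single (pvGA board) board.length p0.1 ((p0.1 : Int), (p0.2 : Int)) hr
        (by
          unfold pvGA
          rw [find?_range_eq_some _ board.length p0.2 hc (by simpa [pvQ] using hp0)
            (fun j hj => by
              by_contra hcon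
              rw [Bool.not_eq_false] at hcon
              have hj2 : j < board.length := by omega
              have heqp := huniq (p0.1, j)
                ((mem_gridCells board.length (p0.1, j)).mpr ⟨hr, hj2⟩)
                (by simpa [pvQ] using hcon)
              have : j = p0.2 := congrArg Prod.snd heqp
              omega)]
          rfl)
        (fun i hi hine => by
          unfold pvGA
          rw [List.find?_eq_none.mpr (fun j hj => by
            simp only [Bool.not_eq_true, beq_eq_false_iff_ne, ne_eq]
            intro hq
            have := huniq (i, j)
              ((mem_gridCells board.length (i, j)).mpr ⟨hi, List.mem_range.mp hj⟩)
              (by simpa [pvQ] using hq)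
            exact hine (congrArg Prod.fst this))]
          rfl)]
      rfl
    rw [hA, hB]
    refine ⟨rfl, Or.inl ?_⟩
    simp only
    omega

-- the obstacle list collects exactly the grid's 'X' cells
lemma mem_scan_obs (board : List String) (o : Int × Int) :
    o ∈ (qbScan board (PySem.List.len board)).2 ↔
      (0 ≤ o.1 ∧ o.1 < (board.length : Int) ∧ 0 ≤ o.2 ∧ o.2 < (board.length : Int) ∧
        cellAt board o.1 o.2 = 'X') := by
  have hN : PySem.List.len board = (board.length : Int) := by simp [PySem.List.len_eq]
  rw [qbScan_eq_foldl, hN, Int.toNat_natCast, scan_snd]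
  simp only [List.nil_append, List.mem_map, List.mem_filter]
  constructor
  · rintro ⟨p, ⟨hpmem, hpX⟩, heq⟩
    obtain ⟨h1, h2⟩ := (mem_gridCells board.length p).mp hpmem
    subst heq
    have hXc : cellAt board (p.1 : Int) (p.2 : Int) = 'X' := by simpa [pvX] using hpX
    exact ⟨by simp, by simpa using h1, by simp, by simpa using h2, by simpa using hXc⟩
  · rintro ⟨hb1, hb2, hb3, hb4, hX⟩
    refine ⟨(o.1.toNat, o.2.toNat), ⟨(mem_gridCells board.length _).mpr ⟨by omega, by omega⟩, ?_⟩, ?_⟩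
    · simp only [pvX]
      rw [show ((o.1.toNat : Int)) = o.1 by omega, show ((o.2.toNat : Int)) = o.2 by omega]
      simpa using hX
    · rw [show ((o.1.toNat : Int)) = o.1 by omega, show ((o.2.toNat : Int)) = o.2 by omega]

-- one direction: A's walk equals B's arithmetic
lemma dir_eq (board : List String) (obs : List (Int × Int)) (n qx qy dx dy : Int) (hn : 0 ≤ n)
    (hObs : ∀ o : Int × Int, o ∈ obs ↔
      (0 ≤ o.1 ∧ o.1 < n ∧ 0 ≤ o.2 ∧ o.2 < n ∧ cellAt board o.1 o.2 = 'X'))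
    (hdx : dx = -1 ∨ dx = 0 ∨ dx = 1) (hdy : dy = -1 ∨ dy = 0 ∨ dy = 1)
    (hne : ¬(dx = 0 ∧ dy = 0))
    (hq : (0 ≤ qx ∧ qx < n ∧ 0 ≤ qy ∧ qy < n) ∨ (qx = -1 ∧ qy = -1)) :
    qaWalk board n dx dy qx qy n.toNat =
      qbBest obs qx qy dx dy (qbReach n qx qy dx dy) := by
  obtain ⟨he0, hen, hE⟩ := pvEdge_spec n qx qy dx dy hn hdx hdy hne hq
  rw [qbReach_eq_pvEdge n qx qy dx dy hn hdx hdy hne hq]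
  set e := pvEdge n qx qy dx dy with hedef
  have hwalk : qaWalk board n dx dy qx qy n.toNat = pvSpecW board dx dy e.toNat qx qy :=
    qaWalk_eq_specW board n dx dy n.toNat qx qy e he0 (by omega) hE
  rw [hwalk]
  have hdd : dx ≠ 0 → dx * dx = 1 := by rcases hdx with h|h|h <;> subst h <;> simp
  have hdd' : dy ≠ 0 → dy * dy = 1 := by rcases hdy with h|h|h <;> subst h <;> simp
  have hC : ∀ o ∈ obs, pvRay qx qy dx dy o →
      ∃ kn : Nat, 1 ≤ kn ∧ (kn : Int) ≤ e ∧
        (cellAt board (qx + kn * dx) (qy + kn * dy) == 'X') ∧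
        pvKv qx qy dx dy o = (kn : Int) := by
    intro o ho hray
    obtain ⟨hk1, hox, hoy⟩ := hray
    set k := pvKv qx qy dx dy o with hkdef
    obtain ⟨h1, h2, h3, h4, h5⟩ := (hObs o).mp ho
    have hke : k ≤ e := (hE k hk1).mp (by constructor; omega; constructor; omega; constructor; omega; omega)
    refine ⟨k.toNat, by omega, by omega, ?_, by omega⟩
    have hax : qx + (k.toNat : Int) * dx = o.1 := by
      have : ((k.toNat : Int)) = k := by omega
      rw [this]; omega
    have hay : qy + (k.toNat : Int) * dy = o.2 := by
      have : ((k.toNat : Int)) = k := by omega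
      rw [this]; omega
    rw [hax, hay]
    simpa using h5
  have hC' : ∀ kn : Nat, 1 ≤ kn → (kn : Int) ≤ e →
      (cellAt board (qx + kn * dx) (qy + kn * dy) == 'X') →
      ∃ o ∈ obs, pvRay qx qy dx dy o ∧ pvKv qx qy dx dy o = (kn : Int) := by
    intro kn h1 h2 hX
    have hinb := (hE kn (by omega)).mpr h2
    have hkv : pvKv qx qy dx dy (qx + kn * dx, qy + kn * dy) = (kn : Int) := by
      unfold pvKv
      split_ifs with h
      · have := hdd h; nlinarith [this]
      · have hdy0 : dy ≠ 0 := by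
          intro hc; exact hne ⟨by omega, hc⟩
        have := hdd' hdy0; nlinarith [this]
    refine ⟨(qx + kn * dx, qy + kn * dy), ?_, ?_, hkv⟩
    · exact (hObs _).mpr ⟨hinb.1, hinb.2.1, hinb.2.2.1, hinb.2.2.2, by simpa using hX⟩
    · exact ⟨by rw [hkv]; omega, by rw [hkv]; ring_nf, by rw [hkv]; ring_nf⟩
  by_cases hx : ∃ kn : Nat, 1 ≤ kn ∧ (kn : Int) ≤ e ∧
      (cellAt board (qx + kn * dx) (qy + kn * dy) == 'X') = true
  · classical
    let k0 := Nat.find hx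
    obtain ⟨hk01, hk0e, hk0X⟩ := Nat.find_spec hx
    have hspec : pvSpecW board dx dy e.toNat qx qy = (k0 : Int) - 1 := by
      apply specW_of_first_hit board dx dy e.toNat qx qy k0 hk01 (by omega) hk0X
      intro k hk hkk hc
      exact Nat.find_min hx hkk ⟨hk, by omega, hc⟩
    rw [hspec]
    obtain ⟨o0, ho0, hray0, hkv0⟩ := hC' k0 hk01 hk0e hk0X
    have hle : qbBest obs qx qy dx dy e ≤ (k0 : Int) - 1 := by
      have := qbBest_le_ray obs qx qy dx dy e o0 ho0 hray0
      omega
    rcases qbBest_cases obs qx qy dx dy e with hc | ⟨o, ho, hray, hc⟩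
    · exfalso; omega
    · obtain ⟨kn, hkn1, hkne, hknX, hknv⟩ := hC o ho hray
      have hge : k0 ≤ kn := by
        by_contra hcc
        exact Nat.find_min hx (by omega) ⟨hkn1, hkne, hknX⟩
      omega
  · have hspec : pvSpecW board dx dy e.toNat qx qy = ((e.toNat : Nat) : Int) := by
      apply specW_of_no_hit
      intro k hk hkm hc
      exact hx ⟨k, hk, by omega, hc⟩
    rw [hspec]
    have hcast : ((e.toNat : Nat) : Int) = e := by omega
    rw [hcast]
    rcases qbBest_cases obs qx qy dx dy e with hc | ⟨o, ho, hray, hc⟩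
    · omega
    · obtain ⟨kn, hkn1, hkne, hknX, hknv⟩ := hC o ho hray
      exact absurd ⟨kn, hkn1, hkne, hknX⟩ hx

-- ===== VERDICT (by name: the statement is the Claim_ definition above) =====
theorem queenAttack_spec : Claim_equal_queenAttack := by
  intro board _ hPre
  unfold Spec_queenAttack
  obtain ⟨hscan, hb⟩ := queen_eq board hPre.2
  have hN : PySem.List.len board = (board.length : Int) := by simp [PySem.List.len_eq]
  simp only [queenAttack, queenAttack_alt]
  rw [hscan]
  have hd := fun dx dy hdx hdy hne =>
    dir_eq board (qbScan board (PySem.List.len board)).2 (PySem.List.len board)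
      (qbScan board (PySem.List.len board)).1.1 (qbScan board (PySem.List.len board)).1.2
      dx dy (by rw [hN]; exact Int.natCast_nonneg _) (fun o => by rw [hN]; exact mem_scan_obs board o) hdx hdy hne (by rw [hN]; exact hb)
  simp only [qaDirs, List.foldl_cons, List.foldl_nil]
  rw [hd (-1) 0 (Or.inl rfl) (Or.inr (Or.inl rfl)) (by simp),
      hd 1 0 (Or.inr (Or.inr rfl)) (Or.inr (Or.inl rfl)) (by simp),
      hd 0 (-1) (Or.inr (Or.inl rfl)) (Or.inl rfl) (by simp),
      hd 0 1 (Or.inr (Or.inl rfl)) (Or.inr (Or.inr rfl)) (by simp),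
      hd (-1) (-1) (Or.inl rfl) (Or.inl rfl) (by simp),
      hd (-1) 1 (Or.inl rfl) (Or.inr (Or.inr rfl)) (by simp),
      hd 1 (-1) (Or.inr (Or.inr rfl)) (Or.inl rfl) (by simp),
      hd 1 1 (Or.inr (Or.inr rfl)) (Or.inr (Or.inr rfl)) (by simp)]
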